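-- pv_equiv track=rewrite | github.com/pypi-data/pypi-mirror-386 | packages/wagtail-enap-designsystem/wagtail_enap_designsystem-1.2.1.198.tar.gz/wagtail_enap_designsystem-1.2.1.198/enap_designsystem/views.py | organize_csv_fields
-- ===== SOURCE A (Python) =====
-- def organize_csv_fields(all_fields):
--     """Organiza campos em ordem lógica para o CSV - MELHORADA"""
--
--     # Categorias com prioridade
--     priority_categories = {
--         'identification': [],  # Nome, CPF, etc.
--         'contact': [],        # Email, telefone
--         'content': [],        # Mensagem, textarea
--         'choices': [],        # Dropdowns, radios, checkboxes
--         'files': [],          # Uploads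
--         'other': []           # Outros
--     }
--
--     # Palavras-chave para categorização
--     keywords = {
--         'identification': ['nome', 'name', 'cpf', 'cnpj', 'documento', 'F6Bfae4D', '8190'],
--         'contact': ['email', 'telefone', 'phone', 'celular', '4D07', '981A'],
--         'content': ['mensagem', 'message', 'texto', 'textarea', 'comentario', '269B3Bacfb32'],
--         'choices': ['dropdown', 'radio', 'checkbox'],
--         'files': ['file_upload', 'arquivo'],
--     }
--
--     # Categorizar campos
--     for field in all_fields:
--         field_lower = field.lower()
--         categorized = False
--
--         for category, category_keywords in keywords.items():
--             if any(keyword in field_lower for keyword in category_keywords):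
--                 priority_categories[category].append(field)
--                 categorized = True
--                 break
--
--         if not categorized:
--             priority_categories['other'].append(field)
--
--     # Ordenar dentro de cada categoria (campos de identificação primeiro)
--     def sort_priority(field):
--         field_lower = field.lower()
--         if any(keyword in field_lower for keyword in ['nome', 'name', 'F6Bfae4D']):
--             return 0  # Nome primeiro
--         elif any(keyword in field_lower for keyword in ['sobrenome', 'lastname', '8190']):
--             return 1  # Sobrenome segundo
--         else:
--             return 2  # Outros
--
--     for category in priority_categories.values():
--         category.sort(key=sort_priority)
--
--     # Retornar na ordem de prioridade
--     ordered_fields = (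
--         priority_categories['identification'] +
--         priority_categories['contact'] +
--         priority_categories['content'] +
--         priority_categories['choices'] +
--         priority_categories['files'] +
--         priority_categories['other']
--     )
--
--     return ordered_fields
-- ===== SOURCE B (Python) =====
-- # Simpler rewrite: one ranking function + one stable sort instead of six buckets.
-- _KEYWORDS = [
--     ('identification', ['nome', 'name', 'cpf', 'cnpj', 'documento', 'F6Bfae4D', '8190']),
--     ('contact', ['email', 'telefone', 'phone', 'celular', '4D07', '981A']),
--     ('content', ['mensagem', 'message', 'texto', 'textarea', 'comentario', '269B3Bacfb32']),
--     ('choices', ['dropdown', 'radio', 'checkbox']),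
--     ('files', ['file_upload', 'arquivo']),
-- ]
--
--
-- def _rank(field):
--     field_lower = field.lower()
--     category = next(
--         (i for i, (_, kws) in enumerate(_KEYWORDS)
--          if any(kw in field_lower for kw in kws)),
--         5,
--     )
--     if any(kw in field_lower for kw in ['nome', 'name', 'F6Bfae4D']):
--         priority = 0
--     elif any(kw in field_lower for kw in ['sobrenome', 'lastname', '8190']):
--         priority = 1
--     else:
--         priority = 2
--     return (category, priority)
--
--
-- def organize_csv_fields(all_fields):
--     """Organiza campos em ordem lógica para o CSV - MELHORADA"""
--     return sorted(all_fields, key=_rank)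
-- ===== Notes on version B (the rewrite author's own statement) =====
-- stated objective: simpler
-- what changed: Replaces the six-bucket categorize/append/per-bucket-sort/concatenate pipeline by a single ranking function (category index 0-5, name-priority 0-2) and one stable sorted() call over the whole list.
import Mathlib
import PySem

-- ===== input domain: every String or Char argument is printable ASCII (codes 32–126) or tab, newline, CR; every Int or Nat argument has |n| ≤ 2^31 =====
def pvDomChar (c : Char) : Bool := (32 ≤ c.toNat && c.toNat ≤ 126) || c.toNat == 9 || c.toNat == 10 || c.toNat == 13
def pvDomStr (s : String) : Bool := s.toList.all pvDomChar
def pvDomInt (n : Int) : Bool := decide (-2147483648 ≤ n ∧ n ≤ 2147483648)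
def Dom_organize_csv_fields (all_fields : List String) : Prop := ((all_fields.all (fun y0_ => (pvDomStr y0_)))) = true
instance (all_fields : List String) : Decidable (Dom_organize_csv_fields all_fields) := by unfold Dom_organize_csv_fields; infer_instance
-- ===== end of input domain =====

-- B replaces A's six-bucket categorize/append/per-bucket-sort/concatenate pipeline by one stable
-- sort of the whole list under a (category, priority) ranking key: simpler, one pass over the data.

-- ===== PORT A =====
-- A's priority_categories dict with six fixed keys is ported as a six-field structure.
structure PvBucketsA where
  identification : List String
  contact : List String
  content : List String
  choices : List String
  files : List String
  other : List String

def pvSortPriorityA (field : String) : Nat :=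
  let field_lower := PySem.Str.lower field
  if ["nome", "name", "F6Bfae4D"].any (fun kw => PySem.Str.isIn kw field_lower) then 0
  else if ["sobrenome", "lastname", "8190"].any (fun kw => PySem.Str.isIn kw field_lower) then 1
  else 2

-- The inner 'for category, category_keywords in keywords.items(): … break' over the LITERAL
-- five-entry keywords dict is transliterated as the unrolled else-if chain (same tests, same order,
-- break = first matching branch appends and the rest are skipped).
def organize_csv_fields (all_fields : List String) : List String :=
  let pc := all_fields.foldl (fun (pc : PvBucketsA) field =>
    let field_lower := PySem.Str.lower field
    if ["nome", "name", "cpf", "cnpj", "documento", "F6Bfae4D", "8190"].any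
        (fun kw => PySem.Str.isIn kw field_lower) then
      { pc with identification := pc.identification ++ [field] }
    else if ["email", "telefone", "phone", "celular", "4D07", "981A"].any
        (fun kw => PySem.Str.isIn kw field_lower) then
      { pc with contact := pc.contact ++ [field] }
    else if ["mensagem", "message", "texto", "textarea", "comentario", "269B3Bacfb32"].any
        (fun kw => PySem.Str.isIn kw field_lower) then
      { pc with content := pc.content ++ [field] }
    else if ["dropdown", "radio", "checkbox"].any (fun kw => PySem.Str.isIn kw field_lower) then
      { pc with choices := pc.choices ++ [field] }
    else if ["file_upload", "arquivo"].any (fun kw => PySem.Str.isIn kw field_lower) then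
      { pc with files := pc.files ++ [field] }
    else
      { pc with other := pc.other ++ [field] })
    (⟨[], [], [], [], [], []⟩ : PvBucketsA)
  PySem.List.sorted pc.identification pvSortPriorityA ++
  PySem.List.sorted pc.contact pvSortPriorityA ++
  PySem.List.sorted pc.content pvSortPriorityA ++
  PySem.List.sorted pc.choices pvSortPriorityA ++
  PySem.List.sorted pc.files pvSortPriorityA ++
  PySem.List.sorted pc.other pvSortPriorityA

-- ===== PORT B =====
def pvKeywordListsB : List (List String) :=
  [["nome", "name", "cpf", "cnpj", "documento", "F6Bfae4D", "8190"],
   ["email", "telefone", "phone", "celular", "4D07", "981A"],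
   ["mensagem", "message", "texto", "textarea", "comentario", "269B3Bacfb32"],
   ["dropdown", "radio", "checkbox"],
   ["file_upload", "arquivo"]]

-- Source B's 'next((i for i, (_, kws) in enumerate(_KEYWORDS) if any(...)), 5)'
def pvRankCat (field : String) : Nat :=
  match pvKeywordListsB.findIdx?
      (fun kws => kws.any (fun kw => PySem.Str.isIn kw (PySem.Str.lower field))) with
  | some i => i
  | none => 5

def pvRankPrio (field : String) : Nat :=
  let field_lower := PySem.Str.lower field
  if ["nome", "name", "F6Bfae4D"].any (fun kw => PySem.Str.isIn kw field_lower) then 0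
  else if ["sobrenome", "lastname", "8190"].any (fun kw => PySem.Str.isIn kw field_lower) then 1
  else 2

def organize_csv_fields_alt (all_fields : List String) : List String :=
  PySem.List.sorted2 all_fields pvRankCat pvRankPrio

-- ===== PRECONDITION & SPEC =====
def Spec_organize_csv_fields (all_fields : List String) (out : List String) : Prop := out = organize_csv_fields_alt all_fields
instance (all_fields : List String) (out : List String) : Decidable (Spec_organize_csv_fields all_fields out) := by unfold Spec_organize_csv_fields; infer_instance

-- ===== CLAIM (what is proved, stated in full; the proofs are below) =====
def Claim_equal_organize_csv_fields : Prop := ∀ (all_fields : List String), Dom_organize_csv_fields all_fields → Spec_organize_csv_fields all_fields (organize_csv_fields all_fields)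

-- ===== LEMMAS AND PROOFS =====

-- the lexicographic comparator sorted2 uses
def pvLt (x y : String) : Bool :=
  decide (pvRankCat x < pvRankCat y) ||
    (!decide (pvRankCat y < pvRankCat x) && decide (pvRankPrio x < pvRankPrio y))

lemma pvSorted2_eq_foldl (xs : List String) :
    PySem.List.sorted2 xs pvRankCat pvRankPrio =
      xs.foldl (fun acc x => PySem.List.insertBy pvLt x acc) [] := rfl

@[simp] lemma pvInsertBy_nil (b : String → String → Bool) (x : String) :
    PySem.List.insertBy b x [] = [x] := rfl

@[simp] lemma pvInsertBy_cons (b : String → String → Bool) (x y : String) (ys : List String) :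
    PySem.List.insertBy b x (y :: ys) =
      if b x y then x :: y :: ys else y :: PySem.List.insertBy b x ys := rfl

lemma pvInsertBy_append_left (b : String → String → Bool) (x : String) (L R : List String)
    (h : ∀ y ∈ L, b x y = false) :
    PySem.List.insertBy b x (L ++ R) = L ++ PySem.List.insertBy b x R := by
  induction L with
  | nil => simp
  | cons z L ih =>
      have hz := h z (by simp)
      simp [hz, ih (fun y hy => h y (by simp [hy]))]

lemma pvInsertBy_append_right (b : String → String → Bool) (x : String) (L R : List String)
    (h : ∀ y ∈ R, b x y = true) :
    PySem.List.insertBy b x (L ++ R) = PySem.List.insertBy b x L ++ R := by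
  induction L with
  | nil =>
      cases R with
      | nil => simp
      | cons y ys => simp [h y (by simp)]
  | cons z L ih =>
      by_cases hz : b x z = true
      · simp [hz]
      · simp only [Bool.not_eq_true] at hz
        simp [hz, ih]

lemma pvInsertBy_congr (b b' : String → String → Bool) (x : String) (L : List String)
    (h : ∀ y ∈ L, b x y = b' x y) :
    PySem.List.insertBy b x L = PySem.List.insertBy b' x L := by
  induction L with
  | nil => rfl
  | cons z L ih =>
      have hz := h z (by simp)
      rw [pvInsertBy_cons, pvInsertBy_cons, hz, ih (fun y hy => h y (by simp [hy]))]

-- pvRankCat as the else-if chain of A's categorization tests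
lemma pvRankCat_eq (field : String) :
    pvRankCat field =
      (if ["nome", "name", "cpf", "cnpj", "documento", "F6Bfae4D", "8190"].any
           (fun kw => PySem.Str.isIn kw (PySem.Str.lower field)) then 0
       else if ["email", "telefone", "phone", "celular", "4D07", "981A"].any
           (fun kw => PySem.Str.isIn kw (PySem.Str.lower field)) then 1
       else if ["mensagem", "message", "texto", "textarea", "comentario", "269B3Bacfb32"].any
           (fun kw => PySem.Str.isIn kw (PySem.Str.lower field)) then 2
       else if ["dropdown", "radio", "checkbox"].any
           (fun kw => PySem.Str.isIn kw (PySem.Str.lower field)) then 3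
       else if ["file_upload", "arquivo"].any
           (fun kw => PySem.Str.isIn kw (PySem.Str.lower field)) then 4
       else 5) := by
  rw [pvRankCat, pvKeywordListsB]
  simp only [List.findIdx?_cons, List.findIdx?_nil]
  split_ifs <;> simp_all

lemma pvRankCat_le (field : String) : pvRankCat field ≤ 5 := by
  rw [pvRankCat_eq]
  split_ifs <;> omega

lemma pvPrioA_eq : pvSortPriorityA = pvRankPrio := rfl

-- the categorization fold fills each bucket with exactly the fields of its category index,
-- in input order
lemma pvBuckets_eq (xs : List String) (i c t ch f o : List String) :
    xs.foldl (fun (pc : PvBucketsA) field =>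
      let field_lower := PySem.Str.lower field
      if ["nome", "name", "cpf", "cnpj", "documento", "F6Bfae4D", "8190"].any
          (fun kw => PySem.Str.isIn kw field_lower) then
        { pc with identification := pc.identification ++ [field] }
      else if ["email", "telefone", "phone", "celular", "4D07", "981A"].any
          (fun kw => PySem.Str.isIn kw field_lower) then
        { pc with contact := pc.contact ++ [field] }
      else if ["mensagem", "message", "texto", "textarea", "comentario", "269B3Bacfb32"].any
          (fun kw => PySem.Str.isIn kw field_lower) then
        { pc with content := pc.content ++ [field] }
      else if ["dropdown", "radio", "checkbox"].any (fun kw => PySem.Str.isIn kw field_lower) then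
        { pc with choices := pc.choices ++ [field] }
      else if ["file_upload", "arquivo"].any (fun kw => PySem.Str.isIn kw field_lower) then
        { pc with files := pc.files ++ [field] }
      else
        { pc with other := pc.other ++ [field] })
      (⟨i, c, t, ch, f, o⟩ : PvBucketsA) =
    ⟨i ++ xs.filter (fun x => pvRankCat x == 0),
     c ++ xs.filter (fun x => pvRankCat x == 1),
     t ++ xs.filter (fun x => pvRankCat x == 2),
     ch ++ xs.filter (fun x => pvRankCat x == 3),
     f ++ xs.filter (fun x => pvRankCat x == 4),
     o ++ xs.filter (fun x => pvRankCat x == 5)⟩ := by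
  induction xs generalizing i c t ch f o with
  | nil => simp
  | cons x xs ih =>
      have hc := pvRankCat_eq x
      simp only [List.foldl_cons]
      split_ifs at hc ⊢ <;>
        (rw [ih]; simp [hc, List.append_assoc])

-- the priority comparator used inside each bucket
def pvPr (a b : String) : Bool := decide (pvRankPrio a < pvRankPrio b)

-- the k-th bucket of xs, already stably sorted by priority (proof-side abbreviation)
def pvS (k : Nat) (xs : List String) : List String :=
  PySem.List.sorted (xs.filter (fun y => pvRankCat y == k)) pvRankPrio

lemma pvMem_pvS {x : String} {k : Nat} {xs : List String} (hx : x ∈ pvS k xs) :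
    pvRankCat x = k := by
  rw [pvS, PySem.List.mem_sorted] at hx
  simpa using (List.of_mem_filter hx)

lemma pvS_append_self {x : String} {k : Nat} (hx : pvRankCat x = k) (xs : List String) :
    pvS k (xs ++ [x]) = PySem.List.insertBy pvPr x (pvS k xs) := by
  rw [pvS, pvS, List.filter_append]
  simp only [List.filter_cons, List.filter_nil, hx, beq_self_eq_true, if_true]
  rw [PySem.List.sorted_eq_foldl_insertBy, PySem.List.sorted_eq_foldl_insertBy, List.foldl_append]
  simp only [List.foldl_cons, List.foldl_nil]
  rfl

lemma pvS_append_ne {x : String} {k : Nat} (hx : pvRankCat x ≠ k) (xs : List String) :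
    pvS k (xs ++ [x]) = pvS k xs := by
  rw [pvS, pvS, List.filter_append]
  simp [hx]

-- inserting x by the pair comparator into six concatenated category-homogeneous lists
-- = inserting it by priority into the list of x's own category
lemma pvInsert_six (x : String) (c : Nat) (hc : pvRankCat x = c)
    (L0 L1 L2 L3 L4 L5 : List String)
    (h0 : ∀ y ∈ L0, pvRankCat y = 0) (h1 : ∀ y ∈ L1, pvRankCat y = 1)
    (h2 : ∀ y ∈ L2, pvRankCat y = 2) (h3 : ∀ y ∈ L3, pvRankCat y = 3)
    (h4 : ∀ y ∈ L4, pvRankCat y = 4) (h5 : ∀ y ∈ L5, pvRankCat y = 5) (hle : c ≤ 5) :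
    PySem.List.insertBy pvLt x (L0 ++ (L1 ++ (L2 ++ (L3 ++ (L4 ++ L5))))) =
      (if c = 0 then PySem.List.insertBy pvPr x L0 else L0) ++
      ((if c = 1 then PySem.List.insertBy pvPr x L1 else L1) ++
       ((if c = 2 then PySem.List.insertBy pvPr x L2 else L2) ++
        ((if c = 3 then PySem.List.insertBy pvPr x L3 else L3) ++
         ((if c = 4 then PySem.List.insertBy pvPr x L4 else L4) ++
          (if c = 5 then PySem.List.insertBy pvPr x L5 else L5))))) := by
  interval_cases c
  · norm_num
    have hR : ∀ y ∈ L1 ++ (L2 ++ (L3 ++ (L4 ++ (L5)))), pvLt x y = true := by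
      intro y hy
      rcases List.mem_append.1 hy with m0 | m0'
      · simp [pvLt, h1 y m0, hc]
      rcases List.mem_append.1 m0' with m1 | m1'
      · simp [pvLt, h2 y m1, hc]
      rcases List.mem_append.1 m1' with m2 | m2'
      · simp [pvLt, h3 y m2, hc]
      rcases List.mem_append.1 m2' with m3 | m3'
      · simp [pvLt, h4 y m3, hc]
      simp [pvLt, h5 y m3', hc]
    rw [pvInsertBy_append_right pvLt x L0 _ hR,
        pvInsertBy_congr pvLt pvPr x L0 (fun y hy => by simp [pvLt, pvPr, h0 y hy, hc])]
  · norm_num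
    have hR : ∀ y ∈ L2 ++ (L3 ++ (L4 ++ (L5))), pvLt x y = true := by
      intro y hy
      rcases List.mem_append.1 hy with m0 | m0'
      · simp [pvLt, h2 y m0, hc]
      rcases List.mem_append.1 m0' with m1 | m1'
      · simp [pvLt, h3 y m1, hc]
      rcases List.mem_append.1 m1' with m2 | m2'
      · simp [pvLt, h4 y m2, hc]
      simp [pvLt, h5 y m2', hc]
    rw [pvInsertBy_append_left pvLt x L0 _ (fun y hy => by simp [pvLt, h0 y hy, hc]),
        pvInsertBy_append_right pvLt x L1 _ hR,
        pvInsertBy_congr pvLt pvPr x L1 (fun y hy => by simp [pvLt, pvPr, h1 y hy, hc])]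
  · norm_num
    have hR : ∀ y ∈ L3 ++ (L4 ++ (L5)), pvLt x y = true := by
      intro y hy
      rcases List.mem_append.1 hy with m0 | m0'
      · simp [pvLt, h3 y m0, hc]
      rcases List.mem_append.1 m0' with m1 | m1'
      · simp [pvLt, h4 y m1, hc]
      simp [pvLt, h5 y m1', hc]
    rw [pvInsertBy_append_left pvLt x L0 _ (fun y hy => by simp [pvLt, h0 y hy, hc]),
        pvInsertBy_append_left pvLt x L1 _ (fun y hy => by simp [pvLt, h1 y hy, hc]),
        pvInsertBy_append_right pvLt x L2 _ hR,
        pvInsertBy_congr pvLt pvPr x L2 (fun y hy => by simp [pvLt, pvPr, h2 y hy, hc])]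
  · norm_num
    have hR : ∀ y ∈ L4 ++ (L5), pvLt x y = true := by
      intro y hy
      rcases List.mem_append.1 hy with m0 | m0'
      · simp [pvLt, h4 y m0, hc]
      simp [pvLt, h5 y m0', hc]
    rw [pvInsertBy_append_left pvLt x L0 _ (fun y hy => by simp [pvLt, h0 y hy, hc]),
        pvInsertBy_append_left pvLt x L1 _ (fun y hy => by simp [pvLt, h1 y hy, hc]),
        pvInsertBy_append_left pvLt x L2 _ (fun y hy => by simp [pvLt, h2 y hy, hc]),
        pvInsertBy_append_right pvLt x L3 _ hR,
        pvInsertBy_congr pvLt pvPr x L3 (fun y hy => by simp [pvLt, pvPr, h3 y hy, hc])]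
  · norm_num
    have hR : ∀ y ∈ L5, pvLt x y = true := by
      intro y hy
      simp [pvLt, h5 y hy, hc]
    rw [pvInsertBy_append_left pvLt x L0 _ (fun y hy => by simp [pvLt, h0 y hy, hc]),
        pvInsertBy_append_left pvLt x L1 _ (fun y hy => by simp [pvLt, h1 y hy, hc]),
        pvInsertBy_append_left pvLt x L2 _ (fun y hy => by simp [pvLt, h2 y hy, hc]),
        pvInsertBy_append_left pvLt x L3 _ (fun y hy => by simp [pvLt, h3 y hy, hc]),
        pvInsertBy_append_right pvLt x L4 _ hR,
        pvInsertBy_congr pvLt pvPr x L4 (fun y hy => by simp [pvLt, pvPr, h4 y hy, hc])]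
  · norm_num
    rw [pvInsertBy_append_left pvLt x L0 _ (fun y hy => by simp [pvLt, h0 y hy, hc]),
        pvInsertBy_append_left pvLt x L1 _ (fun y hy => by simp [pvLt, h1 y hy, hc]),
        pvInsertBy_append_left pvLt x L2 _ (fun y hy => by simp [pvLt, h2 y hy, hc]),
        pvInsertBy_append_left pvLt x L3 _ (fun y hy => by simp [pvLt, h3 y hy, hc]),
        pvInsertBy_append_left pvLt x L4 _ (fun y hy => by simp [pvLt, h4 y hy, hc]),
        pvInsertBy_congr pvLt pvPr x L5 (fun y hy => by simp [pvLt, pvPr, h5 y hy, hc])]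

-- inserting x into the concatenation of the six sorted buckets = inserting it into its own bucket
lemma pvStable_step (xs : List String) (x : String) :
    PySem.List.insertBy pvLt x
      (pvS 0 xs ++ (pvS 1 xs ++ (pvS 2 xs ++ (pvS 3 xs ++ (pvS 4 xs ++ pvS 5 xs))))) =
    pvS 0 (xs ++ [x]) ++ (pvS 1 (xs ++ [x]) ++ (pvS 2 (xs ++ [x]) ++
      (pvS 3 (xs ++ [x]) ++ (pvS 4 (xs ++ [x]) ++ pvS 5 (xs ++ [x]))))) := by
  obtain ⟨c, hc⟩ : ∃ c, pvRankCat x = c := ⟨_, rfl⟩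
  have hle : c ≤ 5 := hc ▸ pvRankCat_le x
  rw [pvInsert_six x c hc (pvS 0 xs) (pvS 1 xs) (pvS 2 xs) (pvS 3 xs) (pvS 4 xs) (pvS 5 xs)
      (fun y hy => pvMem_pvS hy) (fun y hy => pvMem_pvS hy) (fun y hy => pvMem_pvS hy)
      (fun y hy => pvMem_pvS hy) (fun y hy => pvMem_pvS hy) (fun y hy => pvMem_pvS hy) hle]
  interval_cases c
  · rw [pvS_append_self hc xs,
        pvS_append_ne (k := 1) (by simp [hc]) xs,
        pvS_append_ne (k := 2) (by simp [hc]) xs,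
        pvS_append_ne (k := 3) (by simp [hc]) xs,
        pvS_append_ne (k := 4) (by simp [hc]) xs,
        pvS_append_ne (k := 5) (by simp [hc]) xs]
    simp
  · rw [pvS_append_self hc xs,
        pvS_append_ne (k := 0) (by simp [hc]) xs,
        pvS_append_ne (k := 2) (by simp [hc]) xs,
        pvS_append_ne (k := 3) (by simp [hc]) xs,
        pvS_append_ne (k := 4) (by simp [hc]) xs,
        pvS_append_ne (k := 5) (by simp [hc]) xs]
    simp
  · rw [pvS_append_self hc xs,
        pvS_append_ne (k := 0) (by simp [hc]) xs,
        pvS_append_ne (k := 1) (by simp [hc]) xs,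
        pvS_append_ne (k := 3) (by simp [hc]) xs,
        pvS_append_ne (k := 4) (by simp [hc]) xs,
        pvS_append_ne (k := 5) (by simp [hc]) xs]
    simp
  · rw [pvS_append_self hc xs,
        pvS_append_ne (k := 0) (by simp [hc]) xs,
        pvS_append_ne (k := 1) (by simp [hc]) xs,
        pvS_append_ne (k := 2) (by simp [hc]) xs,
        pvS_append_ne (k := 4) (by simp [hc]) xs,
        pvS_append_ne (k := 5) (by simp [hc]) xs]
    simp
  · rw [pvS_append_self hc xs,
        pvS_append_ne (k := 0) (by simp [hc]) xs,
        pvS_append_ne (k := 1) (by simp [hc]) xs,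
        pvS_append_ne (k := 2) (by simp [hc]) xs,
        pvS_append_ne (k := 3) (by simp [hc]) xs,
        pvS_append_ne (k := 5) (by simp [hc]) xs]
    simp
  · rw [pvS_append_self hc xs,
        pvS_append_ne (k := 0) (by simp [hc]) xs,
        pvS_append_ne (k := 1) (by simp [hc]) xs,
        pvS_append_ne (k := 2) (by simp [hc]) xs,
        pvS_append_ne (k := 3) (by simp [hc]) xs,
        pvS_append_ne (k := 4) (by simp [hc]) xs]
    simp

-- stable sort by the pair key = concatenation of the per-category stably sorted buckets
lemma pvSorted2_eq_buckets (xs : List String) :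
    PySem.List.sorted2 xs pvRankCat pvRankPrio =
      pvS 0 xs ++ (pvS 1 xs ++ (pvS 2 xs ++ (pvS 3 xs ++ (pvS 4 xs ++ pvS 5 xs)))) := by
  induction xs using List.reverseRecOn with
  | nil => simp [pvSorted2_eq_foldl, pvS, PySem.List.sorted]
  | append_singleton xs x ih =>
      rw [pvSorted2_eq_foldl, List.foldl_append, ← pvSorted2_eq_foldl, ih]
      simp only [List.foldl_cons, List.foldl_nil]
      exact pvStable_step xs x

-- ===== VERDICT (by name: the statement is the Claim_ definition above) =====
theorem organize_csv_fields_spec : Claim_equal_organize_csv_fields := by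
  intro all_fields _
  show organize_csv_fields all_fields = organize_csv_fields_alt all_fields
  rw [organize_csv_fields, organize_csv_fields_alt, pvBuckets_eq, pvSorted2_eq_buckets]
  simp [pvS, pvPrioA_eq, List.append_assoc]
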